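-- pv_equiv track=rewrite | github.com/adamjamesreid/hepatocystis-genome | crop_translatorx_alignments.py | separate_seq_to_subseq
-- ===== SOURCE A (Python) =====
-- def separate_seq_to_subseq(seq):
--     """
--     Input: DNA sequence (string, with - for gaps)
--     Output: input string broken into a list of fragments, so that each list element contains either only gaps or only nucleotides
--     """
--     seq_list = list()
--     current_str = ""
--     previous_ch = None
--     for i in range(0, len(seq)):
--         ch = seq[i]
--         if previous_ch != None:
--             if ch == "-" and previous_ch != "-" or ch != "-" and previous_ch == "-":
--                 seq_list.append(current_str)
--                 current_str = ""
--         current_str += ch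
--         previous_ch = ch
--     if len(current_str) != 0:
--         seq_list.append(current_str)
--     return seq_list
-- ===== SOURCE B (Python) =====
-- def separate_seq_to_subseq(seq):
--     n = len(seq)
--     if n == 0:
--         return []
--     cuts = [0] + [i for i in range(1, n) if (seq[i] == "-") != (seq[i - 1] == "-")] + [n]
--     return [seq[a:b] for a, b in zip(cuts, cuts[1:])]
-- ===== Notes on version B (the rewrite author's own statement) =====
-- stated objective: alternative
-- what changed: Replaces A's single stateful pass (previous-char flag plus accumulator flush) by two staged passes: first compute the list of cut indices where the gap/nucleotide key changes, then slice the string between consecutive cut points.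
import Mathlib
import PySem

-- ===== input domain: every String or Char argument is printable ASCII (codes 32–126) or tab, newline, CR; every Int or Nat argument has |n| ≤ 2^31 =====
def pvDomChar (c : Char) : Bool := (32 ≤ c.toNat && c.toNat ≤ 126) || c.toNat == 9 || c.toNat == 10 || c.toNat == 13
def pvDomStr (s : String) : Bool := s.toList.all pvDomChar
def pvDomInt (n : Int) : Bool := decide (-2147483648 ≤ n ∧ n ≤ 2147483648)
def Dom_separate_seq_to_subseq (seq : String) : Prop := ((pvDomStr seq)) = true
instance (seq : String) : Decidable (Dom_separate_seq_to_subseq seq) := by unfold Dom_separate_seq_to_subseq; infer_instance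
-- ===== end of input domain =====

-- B replaces A's single stateful pass (previous-char flag + accumulator flush) by two
-- staged passes: first the list of cut indices where the gap/nucleotide key changes,
-- then slicing between consecutive cuts; objective: alternative.


-- ===== PORT A =====
-- Python strings are handled as List Char (PySem convention); the loop state is
-- (seq_list, current_str, previous_ch) exactly as in A.
def sepLoopA (acc : List (List Char)) (cur : List Char) (prev : Option Char) :
    List Char → List (List Char)
  | [] => if cur.length ≠ 0 then acc ++ [cur] else acc
  | ch :: rest =>
    match prev with
    | none => sepLoopA acc (cur ++ [ch]) (some ch) rest
    | some p =>
      if (ch == '-' && !(p == '-')) || (!(ch == '-') && p == '-') then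
        sepLoopA (acc ++ [cur]) ([] ++ [ch]) (some ch) rest
      else
        sepLoopA acc (cur ++ [ch]) (some ch) rest

def separate_seq_to_subseq (seq : String) : List String :=
  (sepLoopA [] [] none seq.toList).map String.ofList

-- ===== PORT B =====
-- [i for i in range(1, n) if (seq[i] == '-') != (seq[i-1] == '-')]:
-- range(1, n) = List.range' 1 (n-1); indices are in range, so seq[i] is getD.
def chgB (l : List Char) : List Nat :=
  (List.range' 1 (l.length - 1)).filter
    (fun i => !((l.getD i ' ' == '-') == (l.getD (i - 1) ' ' == '-')))

-- cuts = [0] + changes + [n]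
def cutsB (l : List Char) : List Nat := 0 :: (chgB l ++ [l.length])

-- zip(cuts, cuts[1:]) = cuts.zip cuts.tail; seq[a:b] with 0 ≤ a ≤ b ≤ n (the cut
-- indices are ascending and in range) is exactly (l.drop a).take (b - a).
def separate_seq_to_subseq_alt (seq : String) : List String :=
  if seq.toList.length = 0 then []
  else ((cutsB seq.toList).zip (cutsB seq.toList).tail).map
    (fun p => String.ofList ((seq.toList.drop p.1).take (p.2 - p.1)))

-- ===== PRECONDITION & SPEC =====
def Spec_separate_seq_to_subseq (seq : String) (out : List String) : Prop := out = separate_seq_to_subseq_alt seq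
instance (seq : String) (out : List String) : Decidable (Spec_separate_seq_to_subseq seq out) := by unfold Spec_separate_seq_to_subseq; infer_instance

-- ===== CLAIM (what is proved, stated in full; the proofs are below) =====
def Claim_equal_separate_seq_to_subseq : Prop := ∀ (seq : String), Dom_separate_seq_to_subseq seq → Spec_separate_seq_to_subseq seq (separate_seq_to_subseq seq)

-- ===== LEMMAS AND PROOFS =====

-- Common reference: the list of maximal single-key runs (bridge between A and B).
def runsB : List Char → List (List Char)
  | [] => []
  | c :: cs =>
    (c :: cs.takeWhile (fun d => (d == '-') == (c == '-'))) ::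
      runsB (cs.dropWhile (fun d => (d == '-') == (c == '-')))
termination_by l => l.length
decreasing_by
  exact Nat.lt_succ_of_le (List.length_dropWhile_le _ _)

-- ---------- A = runs ----------

-- A's flush condition is exactly "gap-key differs from the previous char's key".
lemma flush_cond (ch p : Char) :
    ((ch == '-' && !(p == '-')) || (!(ch == '-') && p == '-')) = !((ch == '-') == (p == '-')) := by
  cases h1 : (ch == '-') <;> cases h2 : (p == '-') <;> simp

-- Invariant: with a nonempty current run whose control char is p, the loop emits
-- acc, then the current run extended by the next same-key prefix, then the runs of
-- the remainder.
lemma sepLoopA_glue (rest : List Char) :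
    ∀ (acc : List (List Char)) (cur : List Char) (p : Char), cur ≠ [] →
    sepLoopA acc cur (some p) rest =
      acc ++ (cur ++ rest.takeWhile (fun d => (d == '-') == (p == '-'))) ::
        runsB (rest.dropWhile (fun d => (d == '-') == (p == '-'))) := by
  induction rest with
  | nil =>
    intro acc cur p hcur
    simp [sepLoopA, runsB, List.length_eq_zero_iff, hcur]
  | cons ch rs ih =>
    intro acc cur p hcur
    rw [sepLoopA, flush_cond]
    by_cases hk : ((ch == '-') == (p == '-')) = true
    · rw [hk]
      simp only [Bool.not_true, Bool.false_eq_true, if_false]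
      rw [ih acc (cur ++ [ch]) ch (by simp)]
      have hfun : (fun d => (d == '-') == (ch == '-')) = (fun d => (d == '-') == (p == '-')) := by
        funext d; rw [show (ch == '-') = (p == '-') from of_decide_eq_true (by exact hk)]
      rw [hfun]
      simp [hk]
    · have hk' : ((ch == '-') == (p == '-')) = false := by
        cases h : ((ch == '-') == (p == '-')) <;> simp_all
      rw [hk']
      simp only [Bool.not_false, if_true]
      rw [ih (acc ++ [cur]) ([] ++ [ch]) ch (by simp)]
      simp [hk', runsB]

lemma portA_eq_runs (l : List Char) : sepLoopA [] [] none l = runsB l := by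
  cases l with
  | nil => simp [sepLoopA, runsB]
  | cons c cs =>
    rw [sepLoopA, sepLoopA_glue cs [] ([] ++ [c]) c (by simp)]
    simp [runsB]


-- ---------- B = runs ----------

-- Every index up to the end of a prefix whose chars share the head's gap-key reads
-- that key.
lemma getD_key_prefix (c : Char) (t d : List Char)
    (ht : ∀ x ∈ t, (x == '-') = (c == '-')) (i : Nat) (hi : i ≤ t.length) :
    (((c :: (t ++ d)).getD i ' ') == '-') = (c == '-') := by
  cases i with
  | zero => simp
  | succ j =>
    have hj : j < t.length := by omega
    have h1 : (c :: (t ++ d)).getD (j + 1) ' ' = (t ++ d).getD j ' ' := rfl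
    rw [h1, List.getD_append _ _ _ _ hj, List.getD_eq_getElem _ _ hj]
    exact ht _ (List.getElem_mem hj)

-- Indices past that prefix read from the suffix.
lemma getD_key_suffix (c : Char) (t d : List Char) (j : Nat) :
    (c :: (t ++ d)).getD (1 + t.length + j) ' ' = d.getD j ' ' := by
  have h0 : 1 + t.length + j = (t.length + j) + 1 := by omega
  rw [h0]
  have h1 : (c :: (t ++ d)).getD ((t.length + j) + 1) ' ' = (t ++ d).getD (t.length + j) ' ' := rfl
  rw [h1, List.getD_append_right _ _ _ _ (by omega)]
  congr 1
  omega

-- The change list of c :: (t ++ d), where t shares c's gap-key and d starts with the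
-- other key: empty if d is empty, otherwise the end of the first run followed by d's
-- change list shifted.
lemma chgB_split (c : Char) (t d : List Char)
    (ht : ∀ x ∈ t, (x == '-') = (c == '-'))
    (hd : ∀ (e : Char) (es : List Char), d = e :: es → ¬ (e == '-') = (c == '-')) :
    chgB (c :: (t ++ d)) =
      if d = [] then []
      else (1 + t.length) :: (chgB d).map (fun x => (1 + t.length) + x) := by
  unfold chgB
  have hlen : (c :: (t ++ d)).length - 1 = t.length + d.length := by simp
  rw [hlen]
  have hsplit : List.range' 1 (t.length + d.length) =
      List.range' 1 t.length ++ List.range' (1 + t.length) d.length := by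
    simp
  rw [hsplit, List.filter_append]
  have hfst : (List.range' 1 t.length).filter
      (fun i => !(((c :: (t ++ d)).getD i ' ' == '-') == ((c :: (t ++ d)).getD (i - 1) ' ' == '-'))) = [] := by
    rw [List.filter_eq_nil_iff]
    intro i hi
    obtain ⟨w, hw, hiw⟩ := List.mem_range'.mp hi
    have h1 : i ≤ t.length := by omega
    have h2 : i - 1 ≤ t.length := by omega
    rw [getD_key_prefix c t d ht i h1, getD_key_prefix c t d ht (i - 1) h2]
    simp
  rw [hfst, List.nil_append]
  cases d with
  | nil => simp
  | cons e es =>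
    rw [if_neg (by simp)]
    have hss : List.range' (1 + t.length) (e :: es).length =
        (1 + t.length) :: List.range' (1 + t.length + 1) es.length := by
      rw [List.length_cons, List.range'_succ]
    rw [hss, List.filter_cons]
    have hP0 : (!(((c :: (t ++ e :: es)).getD (1 + t.length) ' ' == '-') ==
        ((c :: (t ++ e :: es)).getD (1 + t.length - 1) ' ' == '-'))) = true := by
      have ha : (c :: (t ++ e :: es)).getD (1 + t.length) ' ' = e := by
        have := getD_key_suffix c t (e :: es) 0
        simpa using this
      have hb : ((c :: (t ++ e :: es)).getD (1 + t.length - 1) ' ' == '-') = (c == '-') := by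
        have h2 : 1 + t.length - 1 = t.length := by omega
        rw [h2]
        exact getD_key_prefix c t (e :: es) ht t.length le_rfl
      rw [ha, hb]
      have := hd e es rfl
      cases hc : (e == '-') <;> cases hc2 : (c == '-') <;> simp_all
    rw [if_pos hP0]
    have hmap : List.range' (1 + t.length + 1) es.length =
        (List.range' 1 es.length).map (fun x => (1 + t.length) + x) := by
      have h := List.map_add_range' (a := 1 + t.length) 1 es.length 1
      simpa using h.symm
    rw [hmap, List.filter_map]
    have hcong : (List.range' 1 es.length).filter
        ((fun i => !(((c :: (t ++ e :: es)).getD i ' ' == '-') ==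
          ((c :: (t ++ e :: es)).getD (i - 1) ' ' == '-'))) ∘ (fun x => (1 + t.length) + x)) =
        (List.range' 1 es.length).filter
        (fun i => !(((e :: es).getD i ' ' == '-') == ((e :: es).getD (i - 1) ' ' == '-'))) := by
      apply List.filter_congr
      intro j hj
      obtain ⟨w, hw, hjw⟩ := List.mem_range'.mp hj
      have hj1 : 1 ≤ j := by omega
      have ha : (c :: (t ++ e :: es)).getD (1 + t.length + j) ' ' = (e :: es).getD j ' ' :=
        getD_key_suffix c t (e :: es) j
      have hb : (c :: (t ++ e :: es)).getD (1 + t.length + j - 1) ' ' = (e :: es).getD (j - 1) ' ' := by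
        have h2 : 1 + t.length + j - 1 = 1 + t.length + (j - 1) := by omega
        rw [h2]
        exact getD_key_suffix c t (e :: es) (j - 1)
      simp only [Function.comp]
      rw [ha, hb]
    rw [hcong]
    have hlen2 : (e :: es).length - 1 = es.length := by simp
    rw [hlen2]

-- Pairing a shifted cut list peels off as a map over the unshifted pairs.
lemma zip_shift (f : Nat → Nat) (r : List Nat) (k : Nat) (hk : f 0 = k) :
    (k :: r.map f).zip (r.map f) = ((0 :: r).zip r).map (Prod.map f f) := by
  rw [← hk, ← List.map_cons, List.zip_map]

-- Slicing between consecutive cuts yields exactly the runs.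
lemma slices_eq_runs : ∀ (n : Nat) (l : List Char), l.length ≤ n → l ≠ [] →
    ((cutsB l).zip (cutsB l).tail).map (fun p => (l.drop p.1).take (p.2 - p.1)) = runsB l := by
  intro n
  induction n with
  | zero =>
    intro l hl hne
    cases l with
    | nil => exact absurd rfl hne
    | cons c cs => simp at hl
  | succ n ih =>
    intro l hl hne
    cases l with
    | nil => exact absurd rfl hne
    | cons c cs =>
      have ht : ∀ x ∈ cs.takeWhile (fun x => (x == '-') == (c == '-')), (x == '-') = (c == '-') := by
        intro x hx
        simpa using List.mem_takeWhile_imp hx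
      have hd : ∀ (e : Char) (es : List Char),
          cs.dropWhile (fun x => (x == '-') == (c == '-')) = e :: es → ¬ (e == '-') = (c == '-') := by
        intro e es hde
        have hnn : cs.dropWhile (fun x => (x == '-') == (c == '-')) ≠ [] := by rw [hde]; simp
        have h := List.head_dropWhile_not (fun x => (x == '-') == (c == '-')) hnn
        have hgen : ∀ (l' : List Char) (hl' : l' ≠ []), l' = e :: es → l'.head hl' = e := by
          intro l' hl' hle
          subst hle
          rfl
        rw [hgen _ hnn hde] at h
        simpa using h
      have hcs : cs = cs.takeWhile (fun x => (x == '-') == (c == '-')) ++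
          cs.dropWhile (fun x => (x == '-') == (c == '-')) := (List.takeWhile_append_dropWhile).symm
      conv_rhs => rw [runsB]
      set T := cs.takeWhile (fun x => (x == '-') == (c == '-')) with hT
      set D := cs.dropWhile (fun x => (x == '-') == (c == '-')) with hD
      have hlD : D.length ≤ n := by
        have h1 : D.length ≤ cs.length := by rw [hD]; exact List.length_dropWhile_le _ _
        have h2 : (c :: cs).length = cs.length + 1 := rfl
        omega
      rw [hcs]
      have hchg := chgB_split c T D ht hd
      by_cases hdnil : D = []
      · -- the whole list is a single run
        have hrB : runsB ([] : List Char) = [] := by rw [runsB]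
        rw [hdnil] at hchg ⊢
        rw [List.append_nil] at hchg ⊢
        rw [if_pos rfl] at hchg
        simp only [cutsB, hchg, List.nil_append, List.tail_cons, hrB]
        rw [show ((0 : Nat) :: [(c :: T).length]).zip [(c :: T).length] = [(0, (c :: T).length)] from rfl,
          List.map_cons, List.map_nil, List.drop_zero, Nat.sub_zero, List.take_length]
      · -- at least two runs: first slice, then the shifted remainder
        have hchg1 : chgB (c :: (T ++ D)) = (1 + T.length) ::
            (chgB D).map (fun x => (1 + T.length) + x) := by rw [hchg, if_neg hdnil]
        have hlen1 : (c :: (T ++ D)).length = (1 + T.length) + D.length := by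
          simp
          omega
        have hfirst : ((c :: (T ++ D)).drop 0).take ((1 + T.length) - 0) = c :: T := by
          rw [List.drop_zero, Nat.sub_zero, Nat.add_comm 1 T.length, List.take_succ_cons,
            List.take_left]
        have hdrop : (c :: (T ++ D)).drop (1 + T.length) = D := by
          rw [Nat.add_comm 1 T.length, List.drop_succ_cons, List.drop_left]
        have hslice : ((fun p : Nat × Nat => ((c :: (T ++ D)).drop p.1).take (p.2 - p.1)) ∘
            (Prod.map (fun x => (1 + T.length) + x) (fun x => (1 + T.length) + x))) =
            (fun p : Nat × Nat => (D.drop p.1).take (p.2 - p.1)) := by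
          funext p
          simp only [Function.comp, Prod.map]
          rw [← List.drop_drop, hdrop]
          congr 1
          omega
        simp only [cutsB, hchg1, hlen1, List.cons_append, List.tail_cons]
        rw [show (chgB D).map (fun x => (1 + T.length) + x) ++ [(1 + T.length) + D.length] =
            (chgB D ++ [D.length]).map (fun x => (1 + T.length) + x) from by simp]
        rw [List.zip_cons_cons, List.map_cons, hfirst,
          zip_shift (fun x => (1 + T.length) + x) (chgB D ++ [D.length]) (1 + T.length)
            (Nat.add_zero _),
          List.map_map, hslice]
        have hc1 : (0 :: (chgB D ++ [D.length])) = cutsB D := rfl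
        have hc2 : (chgB D ++ [D.length]) = (cutsB D).tail := rfl
        rw [hc1, hc2, ih D hlD hdnil]

theorem separate_seq_to_subseq_eq (seq : String) :
    separate_seq_to_subseq seq = separate_seq_to_subseq_alt seq := by
  unfold separate_seq_to_subseq separate_seq_to_subseq_alt
  by_cases h : seq.toList = []
  · simp [h, sepLoopA]
  · rw [if_neg (by simpa [List.length_eq_zero_iff] using h), portA_eq_runs,
      ← slices_eq_runs seq.toList.length seq.toList le_rfl h, List.map_map]
    rfl

-- ===== VERDICT (by name: the statement is the Claim_ definition above) =====
theorem separate_seq_to_subseq_spec : Claim_equal_separate_seq_to_subseq := by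
  intro seq _
  exact separate_seq_to_subseq_eq seq
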